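-- pv_equiv track=rewrite | github.com/AaronLieb/MarchMadness | coding_challenges/day5/b/util.py | kNacci
-- ===== SOURCE A (Python) =====
-- MOD = 10**7+7 # TODO: increase for prod (to 7)
--
-- def kNacci(k: int, idx: int) -> int:
--     prev = [0] + [1] * (k - 1) + [0] * idx
--     if idx < k: return prev[idx-1]
--
--     i = k
--     while i < idx:
--         s = 0
--         for num in prev[i-k:i]:
--             s += (num % MOD)
--         prev[i] = s
--         i += 1
--
--     return prev[idx-1] % MOD
-- ===== SOURCE B (Python) =====
-- MOD = 10**7+7
--
-- def kNacci(k: int, idx: int) -> int: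
--     # O(idx) one-pass: keep the already-reduced terms and a running window sum,
--     # adding the new term and subtracting the term that leaves the window.
--     if idx < k:
--         return 0 if idx == 1 else 1
--     b = [0] + [1] * (k - 1)
--     s = k - 1
--     for i in range(k, idx):
--         new = s % MOD
--         s += new - b[i - k]
--         b.append(new)
--     return b[-1] % MOD
-- ===== Notes on version B (the rewrite author's own statement) =====
-- stated objective: faster
-- what changed: Replaces A's inner re-summation of the k-element window at every step (O(idx*k)) by a single pass keeping a running window sum (add the new reduced term, subtract the outgoing one), so the inner loop disappears.
-- outside the precondition, e.g. on kNacci(1, 0): A returns 0, B returns 1; on kNacci(0, 5): A returns 0, B returns 10000002; on kNacci(3, -1): A returns 1, B returns 1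
import Mathlib
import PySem

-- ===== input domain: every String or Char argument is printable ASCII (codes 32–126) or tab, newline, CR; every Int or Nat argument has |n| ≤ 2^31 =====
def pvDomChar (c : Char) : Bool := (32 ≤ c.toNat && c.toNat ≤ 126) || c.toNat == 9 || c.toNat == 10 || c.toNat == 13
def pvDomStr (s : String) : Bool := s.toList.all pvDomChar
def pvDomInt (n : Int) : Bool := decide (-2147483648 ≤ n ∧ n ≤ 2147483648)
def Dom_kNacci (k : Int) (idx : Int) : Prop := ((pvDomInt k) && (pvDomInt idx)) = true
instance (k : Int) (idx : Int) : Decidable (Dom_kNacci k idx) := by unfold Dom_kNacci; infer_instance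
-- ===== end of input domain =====

-- B replaces A's O(idx·k) re-summation of the k-window by an O(idx) running window sum
-- (add the new reduced term, subtract the term leaving the window); return values only.
-- Python lists are ported as Array Int inside the loops (O(1) store/append, as in Python).

def pvMOD : Int := 10 ^ 7 + 7

-- ===== PORT A =====
-- inner 'for num in prev[i-k:i]: s += num % MOD'
def pvInnerSum (l : List Int) : Int :=
  l.foldl (fun s num => s + PySem.Int.mod num pvMOD) 0

-- 'while i < idx' loop, fuel = number of remaining iterations.  The slice prev[i-k:i]
-- and the store prev[i] = s use .toNat indices: exact for 0 ≤ i-k ≤ i, which holds on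
-- every iteration reached from an admitted input (k ≤ i throughout).
def pvALoop (k : Int) (prev : Array Int) (i : Int) : Nat → Array Int
  | 0 => prev
  | fuel + 1 =>
    let s := pvInnerSum (prev.extract (i - k).toNat i.toNat).toList
    pvALoop k (prev.set! i.toNat s) (i + 1) fuel

def kNacci (k : Int) (idx : Int) : Int :=
  let prev := ([(0 : Int)] ++ List.replicate (k - 1).toNat 1 ++ List.replicate idx.toNat 0).toArray
  if idx < k then PySem.List.pyGetD prev.toList (idx - 1) 0
  else PySem.Int.mod (PySem.List.pyGetD (pvALoop k prev k (idx - k).toNat).toList (idx - 1) 0) pvMOD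

-- ===== PORT B =====
-- 'for i in range(k, idx)' loop of Source B: b grows with the reduced terms, s is the window
-- sum.  b[i-k] uses a .toNat index: exact, since i-k ≥ 0 on every iteration the Python
-- loop performs (i counts up from k).
def pvBLoop (k : Int) (b : Array Int) (s : Int) (i : Int) : Nat → Array Int
  | 0 => b
  | fuel + 1 =>
    let new := PySem.Int.mod s pvMOD
    let s' := s + new - b.getD (i - k).toNat 0
    pvBLoop k (b.push new) s' (i + 1) fuel

def kNacci_alt (k : Int) (idx : Int) : Int :=
  if idx < k then (if idx = 1 then 0 else 1)
  else
    let b := ([(0 : Int)] ++ List.replicate (k - 1).toNat 1).toArray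
    PySem.Int.mod (PySem.List.pyGetD (pvBLoop k b (k - 1) k (idx - k).toNat).toList (-1) 0) pvMOD

-- ===== PRECONDITION & SPEC =====
-- Pre_ restricts to the natural domain of a k-nacci query (k ≥ 1, idx ≥ 1): outside it A
-- raises IndexError for sufficiently negative idx, and where it does return, its 0/1 values
-- come from negative-index wraparound or an empty summation window, accidents of A's code.
def Pre_kNacci (k : Int) (idx : Int) : Prop := 1 ≤ k ∧ 1 ≤ idx
instance (k : Int) (idx : Int) : Decidable (Pre_kNacci k idx) := by unfold Pre_kNacci; infer_instance
def pvWitness_kNacci : Int × Int := (3, 7)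

def Spec_kNacci (k : Int) (idx : Int) (out : Int) : Prop := out = kNacci_alt k idx
instance (k : Int) (idx : Int) (out : Int) : Decidable (Spec_kNacci k idx out) := by unfold Spec_kNacci; infer_instance

-- ===== CLAIM (what is proved, stated in full; the proofs are below) =====
def Claim_equal_kNacci : Prop := ∀ (k : Int) (idx : Int), Dom_kNacci k idx → Pre_kNacci k idx → Spec_kNacci k idx (kNacci k idx)

-- ===== LEMMAS AND PROOFS =====

-- list-level images of the two loops, used only by the proofs
def pvALoopL (k : Int) (prev : List Int) (i : Int) : Nat → List Int
  | 0 => prev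
  | fuel + 1 =>
    let s := pvInnerSum (PySem.List.slice prev (some (i - k)) (some i))
    pvALoopL k (PySem.List.pySetD prev i s) (i + 1) fuel

def pvBLoopL (k : Int) (b : List Int) (s : Int) (i : Int) : Nat → List Int
  | 0 => b
  | fuel + 1 =>
    let new := PySem.Int.mod s pvMOD
    pvBLoopL k (b ++ [new]) (s + new - PySem.List.pyGetD b (i - k) 0) (i + 1) fuel

lemma pvArray_getD (a : Array Int) (n : Nat) (d : Int) : a.getD n d = a.toList.getD n d := by
  by_cases h : n < a.size
  · simp [Array.getD, h, List.getD_eq_getElem?_getD]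
  · simp [Array.getD, h, List.getD_eq_getElem?_getD]

-- the array loop of port A computes the list loop, elementwise
lemma pvALoop_toList (k : Int) (hk : 1 ≤ k) :
    ∀ (fuel : Nat) (prev : Array Int) (i : Int), k ≤ i →
      (pvALoop k prev i fuel).toList = pvALoopL k prev.toList i fuel := by
  intro fuel
  induction fuel with
  | zero => intro prev i _; rfl
  | succ fuel ih =>
    intro prev i hi
    rw [pvALoop, pvALoopL]
    have hslice : (prev.extract (i - k).toNat i.toNat).toList
        = PySem.List.slice prev.toList (some (i - k)) (some i) := by
      rw [Array.toList_extract, List.extract_eq_take_drop,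
          PySem.List.slice_toNat _ (by omega) (by omega)]
    have hset : (prev.set! i.toNat (pvInnerSum (prev.extract (i - k).toNat i.toNat).toList)).toList
        = PySem.List.pySetD prev.toList i (pvInnerSum (prev.extract (i - k).toNat i.toNat).toList) := by
      rw [Array.set!_eq_setIfInBounds, Array.toList_setIfInBounds,
          PySem.List.pySetD_of_nonneg _ _ (by omega)]
    rw [ih _ _ (by omega), hset, hslice]

-- the array loop of port B computes the list loop, elementwise
lemma pvBLoop_toList (k : Int) (_hk : 1 ≤ k) :
    ∀ (fuel : Nat) (b : Array Int) (s : Int) (i : Int), k ≤ i →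
      (pvBLoop k b s i fuel).toList = pvBLoopL k b.toList s i fuel := by
  intro fuel
  induction fuel with
  | zero => intro b s i _; rfl
  | succ fuel ih =>
    intro b s i hi
    rw [pvBLoop, pvBLoopL]
    have hidx : i - k = (((i - k).toNat : Nat) : Int) := by omega
    have hget : b.getD (i - k).toNat 0 = PySem.List.pyGetD b.toList (i - k) 0 := by
      rw [pvArray_getD, hidx, PySem.List.pyGetD_natCast, Int.toNat_natCast]
    rw [ih _ _ _ (by omega), hget, Array.toList_push]

-- summing (num % MOD) with a foldl is the sum of the reduced list
lemma pvInnerSum_eq (l : List Int) :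
    pvInnerSum l = (l.map (fun x => PySem.Int.mod x pvMOD)).sum := by
  suffices h : ∀ a, l.foldl (fun s num => s + PySem.Int.mod num pvMOD) a
      = a + (l.map (fun x => PySem.Int.mod x pvMOD)).sum by
    simpa [pvInnerSum] using h 0
  induction l with
  | nil => intro a; simp
  | cons x xs ih => intro a; simp [List.foldl, ih]; ring

lemma pvMOD_pos : (0 : Int) < pvMOD := by norm_num [pvMOD]

lemma pvMod_idem (x : Int) :
    PySem.Int.mod (PySem.Int.mod x pvMOD) pvMOD = PySem.Int.mod x pvMOD := by
  rw [PySem.Int.mod_eq_emod_of_pos pvMOD_pos, PySem.Int.mod_eq_emod_of_pos pvMOD_pos,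
      Int.emod_emod_of_dvd x dvd_rfl]

-- main loop invariant: A's list stays 'computed prefix L' + zeros, and B's list is
-- exactly the reduced prefix while s is the sum of its last k entries
lemma pvLoop_inv (k : Int) (hk : 1 ≤ k) :
    ∀ (fuel : Nat) (L : List Int) (z : Nat), k.toNat ≤ L.length → fuel ≤ z →
      ∃ L', pvALoopL k (L ++ List.replicate z 0) (L.length : Int) fuel
              = L' ++ List.replicate (z - fuel) 0
        ∧ L'.length = L.length + fuel
        ∧ pvBLoopL k (L.map (fun x => PySem.Int.mod x pvMOD))
            (((L.map (fun x => PySem.Int.mod x pvMOD)).drop (L.length - k.toNat)).sum)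
            (L.length : Int) fuel
          = L'.map (fun x => PySem.Int.mod x pvMOD) := by
  intro fuel
  induction fuel with
  | zero =>
    intro L z hL _
    exact ⟨L, by simp [pvALoopL], by simp, by simp [pvBLoopL]⟩
  | succ fuel ih =>
    intro L z hL hz
    obtain ⟨z', rfl⟩ : ∃ z', z = z' + 1 := ⟨z - 1, by omega⟩
    have hm : k.toNat ≤ L.length := hL
    have hk0 : (k.toNat : Int) = k := Int.toNat_of_nonneg (by omega)
    have h1 : 1 ≤ k.toNat := by omega
    -- the slice picked by A's inner loop is the last k elements of L
    have hslice : PySem.List.slice (L ++ List.replicate (z' + 1) (0 : Int))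
        (some ((L.length : Int) - k)) (some (L.length : Int))
        = L.drop (L.length - k.toNat) := by
      rw [PySem.List.slice_toNat _ (by omega) (by positivity)]
      have ha : ((L.length : Int) - k).toNat = L.length - k.toNat := by omega
      have hb : ((L.length : Int)).toNat = L.length := by omega
      rw [ha, hb, List.drop_append_of_le_length (by omega)]
      have hw : (L.drop (L.length - k.toNat)).length = k.toNat := by
        simp [List.length_drop]; omega
      rw [List.take_append_of_le_length (by omega)]
      rw [List.take_of_length_le (by omega)]
    set s := pvInnerSum (PySem.List.slice (L ++ List.replicate (z' + 1) (0 : Int))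
        (some ((L.length : Int) - k)) (some (L.length : Int))) with hs
    -- A's one step: write s into the first zero slot
    have hset : PySem.List.pySetD (L ++ List.replicate (z' + 1) (0 : Int)) (L.length : Int) s
        = (L ++ [s]) ++ List.replicate z' 0 := by
      rw [PySem.List.pySetD_of_nonneg _ _ (by positivity)]
      have : ((L.length : Int)).toNat = L.length := by omega
      rw [this, List.set_append]
      simp [List.replicate_succ]
    have hAstep : pvALoopL k (L ++ List.replicate (z' + 1) (0 : Int)) (L.length : Int) (fuel + 1)
        = pvALoopL k ((L ++ [s]) ++ List.replicate z' 0) ((L.length : Int) + 1) fuel := by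
      rw [pvALoopL, ← hs, hset]
    -- value of s as the running window sum
    have hsum : s = ((L.map (fun x => PySem.Int.mod x pvMOD)).drop (L.length - k.toNat)).sum := by
      rw [hs, hslice, pvInnerSum_eq, List.map_drop]
    obtain ⟨L', hA, hlen, hB⟩ := ih (L ++ [s]) z' (by simp; omega) (by omega)
    refine ⟨L', ?_, ?_, ?_⟩
    · rw [hAstep]
      have : ((L ++ [s]).length : Int) = (L.length : Int) + 1 := by simp
      rw [← this]
      simpa using hA
    · simp at hlen; omega
    · -- B's one step
      set red : Int → Int := fun x => PySem.Int.mod x pvMOD with hred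
      set B := L.map red with hBdef
      have hBlen : B.length = L.length := by simp [hBdef]
      have hidx : (L.length : Int) - k = ((L.length - k.toNat : Nat) : Int) := by omega
      have hlt : L.length - k.toNat < B.length := by omega
      have hget : PySem.List.pyGetD B ((L.length : Int) - k) 0 = B[L.length - k.toNat] := by
        rw [hidx, PySem.List.pyGetD_natCast, List.getD_eq_getElem _ _ hlt]
      have hcons : B.drop (L.length - k.toNat)
          = B[L.length - k.toNat] :: B.drop (L.length - k.toNat + 1) :=
        List.drop_eq_getElem_cons hlt
      have hBstep : pvBLoopL k B ((B.drop (L.length - k.toNat)).sum) (L.length : Int) (fuel + 1)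
          = pvBLoopL k (B ++ [red s]) ((B ++ [red s]).drop ((L.length + 1) - k.toNat)).sum
              ((L.length : Int) + 1) fuel := by
        have hnew : PySem.Int.mod ((B.drop (L.length - k.toNat)).sum) pvMOD = red s := by
          rw [hsum]
        have hs' : (B.drop (L.length - k.toNat)).sum + red s
              - PySem.List.pyGetD B ((L.length : Int) - k) 0
            = ((B ++ [red s]).drop ((L.length + 1) - k.toNat)).sum := by
          have hd : (L.length + 1) - k.toNat = (L.length - k.toNat) + 1 := by omega
          rw [hget, hd, List.drop_append_of_le_length (by omega), hcons]
          rw [List.sum_cons, List.sum_append, List.sum_cons, List.sum_nil]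
          ring
        rw [pvBLoopL, hnew, hs']
      have hmap : (L ++ [s]).map red = B ++ [red s] := by simp [hBdef]
      have hlenc : (((L ++ [s]).length : Nat) : Int) = (L.length : Int) + 1 := by simp
      calc pvBLoopL k B ((B.drop (L.length - k.toNat)).sum) (L.length : Int) (fuel + 1)
          = pvBLoopL k ((L ++ [s]).map red)
              (((L ++ [s]).map red).drop ((L ++ [s]).length - k.toNat)).sum
              (((L ++ [s]).length : Nat) : Int) fuel := by
            rw [hBstep, hmap, hlenc]; simp
        _ = L'.map red := hB

-- ===== VERDICT (by name: the statement is the Claim_ definition above) =====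
set_option maxHeartbeats 1000000 in
theorem kNacci_spec : Claim_equal_kNacci := by
  intro k idx _ hpre
  obtain ⟨hk, hidx⟩ := hpre
  show kNacci k idx = kNacci_alt k idx
  have hk0 : ((k.toNat : Int)) = k := Int.toNat_of_nonneg (by omega)
  by_cases hlt : idx < k
  · -- small-index branch: prev[idx-1] is the 0/1 seed
    rw [kNacci, kNacci_alt, if_pos hlt, if_pos hlt]
    by_cases h1 : idx = 1
    · subst h1
      simp [PySem.List.pyGetD_zero_cons]
    · rw [if_neg h1]
      have h2 : 2 ≤ idx := by omega
      have hidx' : idx - 1 = ((idx.toNat - 1 : Nat) : Int) := by omega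
      rw [hidx', PySem.List.pyGetD_natCast]
      simp only [List.cons_append, List.nil_append]
      obtain ⟨j, hjj⟩ : ∃ j, idx.toNat - 1 = j + 1 := ⟨idx.toNat - 2, by omega⟩
      rw [hjj, List.getD_cons_succ]
      rw [List.getD_eq_getElem _ _ (by simp; omega)]
      rw [List.getElem_append_left (by simp; omega)]
      simp
  · have hlt' : k ≤ idx := by omega
    set red : Int → Int := fun x => PySem.Int.mod x pvMOD with hred
    set L0 : List Int := (0 : Int) :: List.replicate (k - 1).toNat 1 with hL0
    have hL0len : L0.length = k.toNat := by simp [hL0]; omega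
    set fuel : Nat := (idx - k).toNat with hfuel
    obtain ⟨L', hA, hlen, hB⟩ := pvLoop_inv k hk fuel L0 idx.toNat
      (by omega) (by omega)
    have hL'len : L'.length = idx.toNat := by omega
    have hL'ne : L' ≠ [] := by
      intro h; rw [h] at hL'len; simp at hL'len; omega
    -- A's side: bridge the array loop to the list loop, then use the invariant
    rw [kNacci, if_neg (by omega)]
    rw [pvALoop_toList k hk _ _ _ (le_refl k)]
    have hprev : [(0 : Int)] ++ List.replicate (k - 1).toNat 1 ++ List.replicate idx.toNat 0
        = L0 ++ List.replicate idx.toNat 0 := by simp [hL0]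
    have hkcast : k = ((L0.length : Nat) : Int) := by rw [hL0len, hk0]
    rw [← hkcast] at hA hB
    rw [hprev, hA]
    -- B's side
    rw [kNacci_alt, if_neg (by omega)]
    show PySem.Int.mod (PySem.List.pyGetD (L' ++ List.replicate (idx.toNat - fuel) 0) (idx - 1) 0) pvMOD
       = PySem.Int.mod (PySem.List.pyGetD (pvBLoop k ([(0 : Int)]
           ++ List.replicate (k - 1).toNat 1).toArray (k - 1) k (idx - k).toNat).toList (-1) 0) pvMOD
    rw [pvBLoop_toList k hk _ _ _ _ (le_refl k)]
    have hmap0 : ([(0 : Int)] ++ List.replicate (k - 1).toNat 1) = L0 := by simp [hL0]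
    have hmapred : L0.map red = L0 := by
      have r0 : red 0 = 0 := by decide
      have r1 : red 1 = 1 := by decide
      simp [hL0, r0, r1, List.map_replicate]
    have hsum0 : k - 1 = ((L0.map red).drop (L0.length - k.toNat)).sum := by
      rw [hmapred, hL0len, Nat.sub_self, List.drop_zero, hL0]
      simp [List.sum_replicate]
      omega
    rw [hmap0, ← hmapred, hsum0, ← hfuel, hB]
    -- both ends are the reduced last computed element
    have hj : idx - 1 = ((idx.toNat - 1 : Nat) : Int) := by omega
    have hbA : idx.toNat - 1 < (L' ++ List.replicate (idx.toNat - fuel) 0).length := by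
      simp; omega
    have hbA' : idx.toNat - 1 < L'.length := by omega
    rw [hj, PySem.List.pyGetD_natCast, List.getD_eq_getElem _ _ hbA,
        List.getElem_append_left hbA']
    have hmapne : L'.map red ≠ [] := by simp [hL'ne]
    rw [PySem.List.pyGetD_neg_one _ _ hmapne, List.getLast_eq_getElem]
    simp only [List.getElem_map, List.length_map, hL'len, hred]
    exact (pvMod_idem _).symm
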